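-- pv_equiv track=rewrite | github.com/ChiefAntiphates/wordle-solver | wordleSolver.py | getMostOfCertain
-- ===== SOURCE A (Python) =====
-- def getMostOfCertain(potentials, certain=['a','e','i','o','u']):
--     most_certain = 0
--     suggested = []
--
--     for word in potentials:
--         certain_no = 0
--         for char in word:
--             if char in certain:
--                 certain_no += 1
--         if certain_no > most_certain:
--             most_certain = certain_no
--             suggested = [word]
--         elif certain_no == most_certain:
--             suggested.append(word)
--     return suggested
-- ===== SOURCE B (Python) =====
-- def getMostOfCertain(potentials, certain=['a','e','i','o','u']):
--     pairs = [(word, sum(1 for char in word if char in certain)) for word in potentials]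
--     best = max((c for _, c in pairs), default=0)
--     return [word for word, c in pairs if c == best]
-- ===== Notes on version B (the rewrite author's own statement) =====
-- stated objective: simpler
-- what changed: Replaces A's online running-max scan with reset-or-append state by a two-phase shape: build (word, vowel-count) pairs once, take the maximum count (0 for empty input), and filter the words attaining it.
import Mathlib
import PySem

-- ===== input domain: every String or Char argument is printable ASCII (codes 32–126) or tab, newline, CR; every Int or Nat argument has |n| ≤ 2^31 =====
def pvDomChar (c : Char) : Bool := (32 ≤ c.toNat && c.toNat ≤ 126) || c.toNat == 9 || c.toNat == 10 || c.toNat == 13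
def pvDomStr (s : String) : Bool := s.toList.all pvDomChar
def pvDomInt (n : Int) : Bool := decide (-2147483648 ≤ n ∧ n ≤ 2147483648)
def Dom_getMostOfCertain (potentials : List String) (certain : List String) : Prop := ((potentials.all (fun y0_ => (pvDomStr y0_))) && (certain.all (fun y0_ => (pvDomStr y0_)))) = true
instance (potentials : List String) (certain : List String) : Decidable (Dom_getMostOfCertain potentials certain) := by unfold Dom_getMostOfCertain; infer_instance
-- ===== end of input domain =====

-- B replaces A's online running-max/reset-or-append scan by a two-phase build-pairs-then-filter shape (objective: simpler).


-- ===== PORT A =====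
-- A's inner loop: count chars of `word` (as 1-char strings) that are members of `certain`.
def pvCountA (certain : List String) (word : String) : Int :=
  word.toList.foldl (fun n c => if certain.contains (String.singleton c) then n + 1 else n) 0

-- A's outer loop step on state (most_certain, suggested)
def pvStepA (certain : List String) (st : Int × List String) (word : String) : Int × List String :=
  let c := pvCountA certain word
  if c > st.1 then (c, [word])
  else if c = st.1 then (st.1, st.2 ++ [word])
  else st

def getMostOfCertain (potentials : List String) (certain : List String) : List String :=
  (potentials.foldl (pvStepA certain) (0, [])).2

-- ===== PORT B =====
-- B's count: length of the filtered character list (sum(1 for char in word if char in certain))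
def pvCountB (certain : List String) (word : String) : Int :=
  ((word.toList.filter (fun c => certain.contains (String.singleton c))).length : Int)

def getMostOfCertain_alt (potentials : List String) (certain : List String) : List String :=
  let pairs := potentials.map (fun w => (w, pvCountB certain w))
  let best := (pairs.map Prod.snd).foldl max 0
  (pairs.filter (fun p => p.2 == best)).map Prod.fst

-- ===== PRECONDITION & SPEC =====
def Spec_getMostOfCertain (potentials : List String) (certain : List String) (out : List String) : Prop := out = getMostOfCertain_alt potentials certain
instance (potentials : List String) (certain : List String) (out : List String) : Decidable (Spec_getMostOfCertain potentials certain out) := by unfold Spec_getMostOfCertain; infer_instance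

-- ===== CLAIM (what is proved, stated in full; the proofs are below) =====
def Claim_equal_getMostOfCertain : Prop := ∀ (potentials : List String) (certain : List String), Dom_getMostOfCertain potentials certain → Spec_getMostOfCertain potentials certain (getMostOfCertain potentials certain)

-- ===== LEMMAS AND PROOFS =====

-- counting by accumulator equals counting by filter-length
theorem pvCount_eq (certain : List String) (word : String) :
    pvCountA certain word = pvCountB certain word := by
  unfold pvCountA pvCountB
  rw [PySem.List.foldl_count_if]
  simp [List.countP_eq_length_filter]

-- invariant of A's outer loop: final max and the filtered suffix
theorem pvLoopA_spec (certain : List String) (ws : List String) :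
    ∀ (m : Int) (s : List String),
      ws.foldl (pvStepA certain) (m, s)
        = ((ws.map (pvCountA certain)).foldl max m,
           (if (ws.map (pvCountA certain)).foldl max m = m then s else [])
             ++ ws.filter (fun w => pvCountA certain w == (ws.map (pvCountA certain)).foldl max m)) := by
  induction ws with
  | nil => intro m s; simp
  | cons w t ih =>
    intro m s
    set c := pvCountA certain w with hc
    simp only [List.foldl_cons, List.map_cons, pvStepA, ← hc]
    have hM : ∀ m' : Int, m' ≤ (t.map (pvCountA certain)).foldl max m' :=
      fun m' => (PySem.List.le_foldl_max (t.map (pvCountA certain)) m').1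
    by_cases h1 : c > m
    · rw [if_pos h1, ih c [w]]
      have hmax : max m c = c := max_eq_right (le_of_lt h1)
      rw [hmax]
      set M := (t.map (pvCountA certain)).foldl max c with hMdef
      have hcM : c ≤ M := hM c
      have hMm : M ≠ m := by omega
      rw [if_neg hMm]
      by_cases h2 : M = c
      · have hb : (pvCountA certain w == M) = true := by rw [← hc]; simp; omega
        simp [hb, ← h2]
      · have hb : (pvCountA certain w == M) = false := by rw [← hc]; simp; omega
        simp [hb, h2]
    · rw [if_neg h1]
      have hmax : max m c = m := by omega
      by_cases h2 : c = m
      · rw [if_pos h2, ih m (s ++ [w]), hmax]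
        set M := (t.map (pvCountA certain)).foldl max m with hMdef
        by_cases h3 : M = m
        · have hb : (pvCountA certain w == M) = true := by rw [← hc]; simp; omega
          simp [List.filter_cons, h3, List.append_assoc]
          omega
        · have hb : (pvCountA certain w == M) = false := by rw [← hc]; simp; omega
          simp [hb, h3]
      · rw [if_neg h2, ih m s, hmax]
        set M := (t.map (pvCountA certain)).foldl max m with hMdef
        have hMge : m ≤ M := hM m
        have hb : (pvCountA certain w == M) = false := by rw [← hc]; simp; omega
        simp [hb]

-- ===== VERDICT (by name: the statement is the Claim_ definition above) =====
theorem getMostOfCertain_spec : Claim_equal_getMostOfCertain := by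
  intro potentials certain _
  unfold Spec_getMostOfCertain getMostOfCertain getMostOfCertain_alt
  have hc : pvCountA certain = pvCountB certain := funext (pvCount_eq certain)
  rw [pvLoopA_spec]
  simp only [List.map_map, List.filter_map, hc]
  have hcomp : (Prod.snd ∘ fun w => (w, pvCountB certain w)) = pvCountB certain := rfl
  rw [hcomp]
  set M := (potentials.map (pvCountB certain)).foldl max 0 with hMdef
  have key : ∀ l : List String,
      (List.filter ((fun p => p.2 == M) ∘ fun w => (w, pvCountB certain w)) l).map
          (Prod.fst ∘ fun w => (w, pvCountB certain w))
        = l.filter (fun w => pvCountB certain w == M) := by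
    intro l
    induction l with
    | nil => rfl
    | cons x xs ihx =>
      simp only [List.filter_cons, Function.comp_apply]
      by_cases hx : (pvCountB certain x == M) = true
      · simp [hx, ihx]
      · simp only [Bool.not_eq_true] at hx
        simp [hx, ihx]
  split <;> simp [← key potentials]
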